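-- pv_equiv track=rewrite | github.com/DansiDanutz/ZmartBot | Documentation/Cryptometer_Final_Package/multi_timeframe_agent.py | _determine_optimal_strategy
-- ===== SOURCE A (Python) =====
-- from typing import Dict, List, Any, Tuple
--
-- def _determine_optimal_strategy(recommendations: List[Dict]) -> str:
--     """Determine optimal trading strategy"""
--     if not recommendations:
--         return 'WAIT_FOR_BETTER_SETUP'
--
--     high_priority = [r for r in recommendations if r['priority'] == 'HIGH']
--     if high_priority:
--         return 'AGGRESSIVE_SCALPING'
--
--     medium_priority = [r for r in recommendations if r['priority'] == 'MEDIUM']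
--     if medium_priority:
--         return 'SWING_TRADING'
--
--     return 'CONSERVATIVE_POSITIONING'
-- ===== SOURCE B (Python) =====
-- def _determine_optimal_strategy(recommendations):
--     """Determine optimal trading strategy"""
--     if not recommendations:
--         return 'WAIT_FOR_BETTER_SETUP'
--
--     scores = {'HIGH': 2, 'MEDIUM': 1}
--     best = 0
--     for r in recommendations:
--         best = max(best, scores.get(r['priority'], 0))
--     return ('CONSERVATIVE_POSITIONING', 'SWING_TRADING', 'AGGRESSIVE_SCALPING')[best]
-- ===== Notes on version B (the rewrite author's own statement) =====
-- stated objective: alternative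
-- what changed: Replaces A's two sequential filter-scans (build high_priority list, then medium_priority list) with a single pass that folds each priority into a numeric score via a lookup table and keeps the running maximum, then indexes a strategy tuple by that score.
import Mathlib
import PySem

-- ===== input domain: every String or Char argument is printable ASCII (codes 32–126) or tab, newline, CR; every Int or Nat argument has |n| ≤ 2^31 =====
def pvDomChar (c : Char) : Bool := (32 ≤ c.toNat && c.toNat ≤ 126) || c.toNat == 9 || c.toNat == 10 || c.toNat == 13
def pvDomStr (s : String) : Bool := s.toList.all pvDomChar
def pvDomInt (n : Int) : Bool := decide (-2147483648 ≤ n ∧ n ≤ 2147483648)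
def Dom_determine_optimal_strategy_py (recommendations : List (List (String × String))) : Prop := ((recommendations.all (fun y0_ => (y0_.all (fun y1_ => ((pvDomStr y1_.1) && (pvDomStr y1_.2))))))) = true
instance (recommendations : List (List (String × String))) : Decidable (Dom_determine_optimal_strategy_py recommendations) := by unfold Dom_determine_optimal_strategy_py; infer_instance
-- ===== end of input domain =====

-- B replaces A's two sequential filter-scans by one fold keeping the maximum priority score,
-- then indexes a strategy table by it (objective: alternative decomposition, same cost).
-- Return-value equivalence only; neither program mutates its argument.

-- r['priority'] (raises KeyError when absent → Pre_; under Pre_ the default is never used)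
def pvPriority (r : List (String × String)) : String := (PySem.Dict.mk r).getD "priority" ""

-- ===== PORT A =====
def determine_optimal_strategy_py (recommendations : List (List (String × String))) : String :=
  if recommendations.isEmpty then "WAIT_FOR_BETTER_SETUP"
  else
    let high_priority := recommendations.filter (fun r => pvPriority r == "HIGH")
    if !high_priority.isEmpty then "AGGRESSIVE_SCALPING"
    else
      let medium_priority := recommendations.filter (fun r => pvPriority r == "MEDIUM")
      if !medium_priority.isEmpty then "SWING_TRADING"
      else "CONSERVATIVE_POSITIONING"

-- ===== PORT B =====
def determine_optimal_strategy_py_alt (recommendations : List (List (String × String))) : String :=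
  if recommendations.isEmpty then "WAIT_FOR_BETTER_SETUP"
  else
    let scores : PySem.Dict String Int := PySem.Dict.mk [("HIGH", 2), ("MEDIUM", 1)]
    let best := recommendations.foldl (fun b r => max b (scores.getD (pvPriority r) 0)) 0
    PySem.List.pyGetD ["CONSERVATIVE_POSITIONING", "SWING_TRADING", "AGGRESSIVE_SCALPING"] best ""

-- ===== PRECONDITION & SPEC =====
-- Pre_ excludes inputs where some recommendation lacks the 'priority' key: A (and B) raise KeyError there.
def Pre_determine_optimal_strategy_py (recommendations : List (List (String × String))) : Prop :=
  (recommendations.all (fun r => (PySem.Dict.mk r).contains "priority")) = true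
instance (recommendations : List (List (String × String))) : Decidable (Pre_determine_optimal_strategy_py recommendations) := by unfold Pre_determine_optimal_strategy_py; infer_instance
def pvWitness_determine_optimal_strategy_py : (List (List (String × String))) :=
  [[("priority", "MEDIUM")], [("priority", "LOW")]]

def Spec_determine_optimal_strategy_py (recommendations : List (List (String × String))) (out : String) : Prop := out = determine_optimal_strategy_py_alt recommendations
instance (recommendations : List (List (String × String))) (out : String) : Decidable (Spec_determine_optimal_strategy_py recommendations out) := by unfold Spec_determine_optimal_strategy_py; infer_instance

-- ===== CLAIM (what is proved, stated in full; the proofs are below) =====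
def Claim_equal_determine_optimal_strategy_py : Prop := ∀ (recommendations : List (List (String × String))), Dom_determine_optimal_strategy_py recommendations → Pre_determine_optimal_strategy_py recommendations → Spec_determine_optimal_strategy_py recommendations (determine_optimal_strategy_py recommendations)

-- ===== LEMMAS AND PROOFS =====

-- the score B folds over
def pvScore (r : List (String × String)) : Int :=
  (PySem.Dict.mk [("HIGH", (2:Int)), ("MEDIUM", 1)]).getD (pvPriority r) 0

-- the maximum score of a list, expressed through A's two predicates
def pvM (recs : List (List (String × String))) : Int :=
  if recs.any (fun r => pvPriority r == "HIGH") then 2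
  else if recs.any (fun r => pvPriority r == "MEDIUM") then 1
  else 0

set_option maxRecDepth 4096 in
lemma pvScore_eq (r : List (String × String)) :
    pvScore r = if pvPriority r == "HIGH" then 2 else if pvPriority r == "MEDIUM" then 1 else 0 := by
  simp only [pvScore, PySem.Dict.getD_eq_get?_getD, PySem.Dict.get?_mk_cons]
  by_cases h1 : pvPriority r = "HIGH"
  · simp [h1]
  · by_cases h2 : pvPriority r = "MEDIUM"
    · simp [h2]
    · simp [h1, h2, Ne.symm h1, Ne.symm h2, PySem.Dict.get?]

lemma pvFilterEmpty (p : List (String × String) → Bool) (l : List (List (String × String))) :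
    (l.filter p).isEmpty = !(l.any p) := by
  induction l with
  | nil => rfl
  | cons x xs ih => by_cases h : p x <;> simp [h, ih]

lemma pvM_bounds (recs : List (List (String × String))) : 0 ≤ pvM recs ∧ pvM recs ≤ 2 := by
  unfold pvM; split_ifs <;> omega

lemma pvFoldl_eq (recs : List (List (String × String))) :
    ∀ b : Int, 0 ≤ b →
      recs.foldl (fun b r => max b ((PySem.Dict.mk [("HIGH", (2:Int)), ("MEDIUM", 1)]).getD (pvPriority r) 0)) b
        = max b (pvM recs) := by
  induction recs with
  | nil => intro b hb; simp [pvM]; omega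
  | cons r rs ih =>
    intro b hb
    have hs : (PySem.Dict.mk [("HIGH", (2:Int)), ("MEDIUM", 1)]).getD (pvPriority r) 0 = pvScore r := rfl
    have hb' : (0:Int) ≤ max b (pvScore r) := le_trans hb (le_max_left _ _)
    simp only [List.foldl_cons, hs]
    rw [ih _ hb']
    have hM : max (pvScore r) (pvM rs) = pvM (r :: rs) := by
      rw [pvScore_eq]
      have hb := pvM_bounds rs
      simp only [pvM, List.any_cons]
      by_cases h1 : pvPriority r == "HIGH" <;> by_cases h2 : pvPriority r == "MEDIUM" <;>
        simp [h1, h2] <;> split_ifs at * <;> omega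
    rw [← hM, max_assoc]

-- ===== VERDICT (by name: the statement is the Claim_ definition above) =====
theorem determine_optimal_strategy_py_spec : Claim_equal_determine_optimal_strategy_py := by
  intro recs _ _
  show determine_optimal_strategy_py recs = determine_optimal_strategy_py_alt recs
  unfold determine_optimal_strategy_py determine_optimal_strategy_py_alt
  by_cases he : recs.isEmpty
  · simp [he]
  · simp only [he, if_false, Bool.false_eq_true]
    rw [pvFoldl_eq _ 0 le_rfl]
    have h0 := pvM_bounds recs
    have hmax : max (0:Int) (pvM recs) = pvM recs := by omega
    rw [hmax]
    rw [pvFilterEmpty, pvFilterEmpty]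
    by_cases h1 : recs.any (fun r => pvPriority r == "HIGH")
    · have hM : pvM recs = 2 := by simp [pvM, h1]
      rw [hM, h1]
      norm_num
      decide
    · by_cases h2 : recs.any (fun r => pvPriority r == "MEDIUM")
      · have hM : pvM recs = 1 := by simp [pvM, h1, h2]
        rw [hM]
        simp only [Bool.not_eq_true] at h1
        rw [h1, h2]
        norm_num
        decide
      · have hM : pvM recs = 0 := by simp [pvM, h1, h2]
        rw [hM]
        simp only [Bool.not_eq_true] at h1 h2
        rw [h1, h2]
        norm_num
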